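-- pv_equiv track=rewrite | github.com/pctablet505/HackerRank | algorithms/Queen's Attack II.py | moveQ
-- ===== SOURCE A (Python) =====
-- def moveQ(n, ur, uc, r, c, obstacles):
--     p = 0
--     while True:
--         r = ur + r
--         c = uc + c
--         key = (r - 1) * n + c
--         if c < 1 or r < 1 or c > n or r > n or key in obstacles:
--             return p
--         p += 1
--     return p
-- ===== SOURCE B (Python) =====
-- def steps_to(o, key1, d):
--     # number of free steps before the ray (key1, key1+d, key1+2d, ...) hits key o, or None if it never does
--     if d == 0:
--         return 0 if o == key1 else None
--     q, rem = divmod(o - key1, d)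
--     if rem == 0 and q >= 0:
--         return q
--     return None
--
--
-- def moveQ(n, ur, uc, r, c, obstacles):
--     r1, c1 = r + ur, c + uc
--     if not (1 <= r1 <= n and 1 <= c1 <= n):
--         return 0
--     lims = []
--     if ur > 0:
--         lims.append(1 + (n - r1) // ur)
--     elif ur < 0:
--         lims.append(1 + (r1 - 1) // (-ur))
--     if uc > 0:
--         lims.append(1 + (n - c1) // uc)
--     elif uc < 0:
--         lims.append(1 + (c1 - 1) // (-uc))
--     ans = min(lims)  # ValueError when ur == uc == 0 (such inputs are outside Pre_)
--     d = ur * n + uc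
--     key1 = (r1 - 1) * n + c1
--     for o in obstacles:
--         s = steps_to(o, key1, d)
--         if s is not None and s < ans:
--             ans = s
--     return ans
-- ===== Notes on version B (the rewrite author's own statement) =====
-- stated objective: alternative
-- what changed: Replaces A's step-by-step walk along the ray with a closed-form distance to the board boundary plus a single scan of the obstacle list computing each obstacle's step index on the ray by division, taking the minimum.
-- outside the precondition, e.g. on moveQ(1, 0, 0, 1, 1, {1}): A returns 0, B raises ValueError
import Mathlib
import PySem

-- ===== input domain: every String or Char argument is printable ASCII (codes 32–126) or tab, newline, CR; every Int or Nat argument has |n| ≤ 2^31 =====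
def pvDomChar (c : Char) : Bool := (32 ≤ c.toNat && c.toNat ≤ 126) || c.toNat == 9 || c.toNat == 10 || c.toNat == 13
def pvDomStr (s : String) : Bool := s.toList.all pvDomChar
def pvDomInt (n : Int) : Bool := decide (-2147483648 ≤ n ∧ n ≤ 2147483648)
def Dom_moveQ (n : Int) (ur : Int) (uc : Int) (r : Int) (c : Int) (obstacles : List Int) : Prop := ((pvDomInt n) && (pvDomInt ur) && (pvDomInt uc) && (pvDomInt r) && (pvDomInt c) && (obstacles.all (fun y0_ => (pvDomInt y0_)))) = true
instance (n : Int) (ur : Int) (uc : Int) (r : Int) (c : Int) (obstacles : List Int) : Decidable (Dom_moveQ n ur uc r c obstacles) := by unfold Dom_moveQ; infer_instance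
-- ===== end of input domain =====

-- B replaces A's step-by-step walk by a closed-form boundary distance plus one scan of the
-- obstacle list (division gives each obstacle's step index on the ray); objective: alternative.

-- ===== PORT A =====
-- A's 'while True' walk; the fuel argument only makes the loop total (it is never
-- exhausted on inputs satisfying Pre_moveQ, as the equivalence proof below shows).
def moveQLoop (n ur uc : Int) (obs : List Int) : Nat → Int → Int → Int → Int
  | 0, _, _, p => p
  | f+1, r, c, p =>
    let r' := ur + r
    let c' := uc + c
    let key := (r' - 1) * n + c'
    if c' < 1 ∨ r' < 1 ∨ c' > n ∨ r' > n ∨ key ∈ obs then p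
    else moveQLoop n ur uc obs f r' c' (p + 1)

def moveQ (n : Int) (ur : Int) (uc : Int) (r : Int) (c : Int) (obstacles : List Int) : Int :=
  moveQLoop n ur uc obstacles (n.toNat + 2) r c 0

-- ===== PORT B =====
-- helper steps_to of Source B
def stepsTo (o key1 d : Int) : Option Int :=
  if d = 0 then (if o = key1 then some 0 else none)
  else if PySem.Int.mod (o - key1) d = 0 ∧ 0 ≤ PySem.Int.floordiv (o - key1) d then
    some (PySem.Int.floordiv (o - key1) d)
  else none

-- helper axis_limits of Source B
def axisLims (n d p1 : Int) : List Int :=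
  if d > 0 then [1 + PySem.Int.floordiv (n - p1) d]
  else if d < 0 then [1 + PySem.Int.floordiv (p1 - 1) (-d)]
  else []

-- body of Source B's 'for o in obstacles' loop
def foldStep (key1 d : Int) (ans o : Int) : Int :=
  match stepsTo o key1 d with
  | some s => if s < ans then s else ans
  | none => ans

def moveQ_alt (n : Int) (ur : Int) (uc : Int) (r : Int) (c : Int) (obstacles : List Int) : Int :=
  let r1 := r + ur
  let c1 := c + uc
  if 1 ≤ r1 ∧ r1 ≤ n ∧ 1 ≤ c1 ∧ c1 ≤ n then
    let lims := axisLims n ur r1 ++ axisLims n uc c1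
    -- Python's min(lims) raises ValueError on []; that happens only outside Pre_moveQ
    let T := (PySem.List.min? lims (fun x => x)).getD 0
    let d := ur * n + uc
    let key1 := (r1 - 1) * n + c1
    obstacles.foldl (foldStep key1 d) T
  else 0

-- ===== PRECONDITION & SPEC =====
-- Pre_ excludes the zero direction (ur = uc = 0) with an in-board first cell: there A either
-- loops forever or (when that cell is an obstacle) returns 0 while B's min([]) raises ValueError.
def Pre_moveQ (n : Int) (ur : Int) (uc : Int) (r : Int) (c : Int) (obstacles : List Int) : Prop :=
  ur ≠ 0 ∨ uc ≠ 0 ∨ r + ur < 1 ∨ r + ur > n ∨ c + uc < 1 ∨ c + uc > n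
instance (n : Int) (ur : Int) (uc : Int) (r : Int) (c : Int) (obstacles : List Int) : Decidable (Pre_moveQ n ur uc r c obstacles) := by unfold Pre_moveQ; infer_instance

def pvWitness_moveQ : Int × Int × Int × Int × Int × List Int := (8, 1, 1, 1, 1, [12])

def Spec_moveQ (n : Int) (ur : Int) (uc : Int) (r : Int) (c : Int) (obstacles : List Int) (out : Int) : Prop := out = moveQ_alt n ur uc r c obstacles
instance (n : Int) (ur : Int) (uc : Int) (r : Int) (c : Int) (obstacles : List Int) (out : Int) : Decidable (Spec_moveQ n ur uc r c obstacles out) := by unfold Spec_moveQ; infer_instance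

-- ===== CLAIM (what is proved, stated in full; the proofs are below) =====
def Claim_equal_moveQ : Prop := ∀ (n : Int) (ur : Int) (uc : Int) (r : Int) (c : Int) (obstacles : List Int), Dom_moveQ n ur uc r c obstacles → Pre_moveQ n ur uc r c obstacles → Spec_moveQ n ur uc r c obstacles (moveQ n ur uc r c obstacles)

-- ===== LEMMAS AND PROOFS =====

-- position of a coordinate after t steps
def posA (x d : Int) (t : Nat) : Int := x + t * d

-- the condition on which A's loop stops at step t
def blkP (n ur uc r c : Int) (obs : List Int) (t : Nat) : Prop :=
  posA c uc t < 1 ∨ posA r ur t < 1 ∨ posA c uc t > n ∨ posA r ur t > n ∨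
    ((posA r ur t - 1) * n + posA c uc t) ∈ obs

lemma loop_eq (n ur uc r c : Int) (obs : List Int) (M : Nat)
    (hblk : blkP n ur uc r c obs (M+1))
    (hfree : ∀ t : Nat, 1 ≤ t → t ≤ M → ¬ blkP n ur uc r c obs t) :
    ∀ (f t : Nat) (p : Int), M + 1 ≤ t + f → t ≤ M →
      moveQLoop n ur uc obs f (posA r ur t) (posA c uc t) p = p + ((M : Int) - (t : Int)) := by
  intro f
  induction f with
  | zero => intro t p h1 h2; omega
  | succ f ih =>
    intro t p h1 h2
    have hr : ur + posA r ur t = posA r ur (t+1) := by simp [posA]; push_cast; ring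
    have hc : uc + posA c uc t = posA c uc (t+1) := by simp [posA]; push_cast; ring
    simp only [moveQLoop]
    rw [hr, hc]
    split_ifs with hb0
    · have hb : blkP n ur uc r c obs (t+1) := hb0
      have ht : t = M := by
        by_contra hne
        exact hfree (t+1) (by omega) (by omega) hb
      subst ht; omega
    · have hb : ¬ blkP n ur uc r c obs (t+1) := hb0
      have ht : t < M := by
        by_contra h
        have : t = M := by omega
        subst this
        exact hb hblk
      rw [ih (t+1) (p+1) (by omega) (by omega)]
      push_cast; ring

lemma stepsTo_sound (o key1 d s : Int) (h : stepsTo o key1 d = some s) :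
    0 ≤ s ∧ o = key1 + s * d := by
  unfold stepsTo at h
  split_ifs at h with h0 h1 h2
  · obtain rfl : (0 : Int) = s := Option.some.inj h
    constructor; · omega
    · subst h0; omega
  · have hq := Option.some.inj h
    have hid := PySem.Int.floordiv_mul_add_mod (o - key1) d
    rw [h2.1, hq] at hid
    refine ⟨hq ▸ h2.2, ?_⟩
    have hcomm : s * d = d * s := mul_comm s d
    omega

lemma stepsTo_complete (o key1 d s : Int) (hs : 0 ≤ s) (ho : o = key1 + s * d) :
    ∃ s', stepsTo o key1 d = some s' ∧ s' ≤ s := by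
  by_cases hd : d = 0
  · subst hd
    refine ⟨0, ?_, hs⟩
    simp [stepsTo, show o = key1 by omega]
  · refine ⟨s, ?_, le_refl s⟩
    have hok : o - key1 = s * d := by omega
    have hmod : PySem.Int.mod (o - key1) d = 0 := by
      rw [PySem.Int.mod_eq_zero_iff_dvd]
      exact ⟨s, by rw [hok, mul_comm]⟩
    have hq : PySem.Int.floordiv (o - key1) d = s := by
      have hid := PySem.Int.floordiv_mul_add_mod (o - key1) d
      rw [hmod] at hid
      have : PySem.Int.floordiv (o - key1) d * d = s * d := by omega
      exact mul_right_cancel₀ hd this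
    simp [stepsTo, hd, hq, hmod, hs]

lemma fold_min (key1 d : Int) (os : List Int) : ∀ (a : Int),
    (os.foldl (foldStep key1 d) a = a ∨
       ∃ o ∈ os, stepsTo o key1 d = some (os.foldl (foldStep key1 d) a)) ∧
    os.foldl (foldStep key1 d) a ≤ a ∧
    (∀ o ∈ os, ∀ s, stepsTo o key1 d = some s → os.foldl (foldStep key1 d) a ≤ s) := by
  induction os with
  | nil => intro a; simp
  | cons o os ih =>
    intro a
    simp only [List.foldl_cons]
    obtain ⟨hcases, hle, hmin⟩ := ih (foldStep key1 d a o)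
    have hstep : foldStep key1 d a o = a ∨
        (stepsTo o key1 d = some (foldStep key1 d a o) ∧ foldStep key1 d a o ≤ a) := by
      unfold foldStep
      cases h : stepsTo o key1 d with
      | none => exact Or.inl rfl
      | some s =>
        by_cases hs : s < a
        · exact Or.inr ⟨by simp [hs], by simp [hs]; omega⟩
        · exact Or.inl (by simp [hs])
    have hstepmin : ∀ s, stepsTo o key1 d = some s → foldStep key1 d a o ≤ s := by
      intro s hso
      unfold foldStep
      rw [hso]
      by_cases hs : s < a <;> simp [hs] <;> omega
    refine ⟨?_, ?_, ?_⟩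
    · rcases hcases with h | ⟨o', ho', h⟩
      · rw [h]
        rcases hstep with h' | ⟨hs, _⟩
        · exact Or.inl h'
        · exact Or.inr ⟨o, List.mem_cons_self .., hs⟩
      · exact Or.inr ⟨o', List.mem_cons_of_mem _ ho', h⟩
    · rcases hstep with h' | ⟨_, h'⟩ <;> omega
    · intro o' ho' s hso
      rcases List.mem_cons.mp ho' with rfl | ho'
      · exact le_trans hle (hstepmin s hso)
      · exact hmin o' ho' s hso

lemma axis_le_iff (n d p1 : Int) (h1 : 1 ≤ p1) (h2 : p1 ≤ n) (s : Int) (hs : 0 ≤ s) :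
    (∀ x ∈ axisLims n d p1, s + 1 ≤ x) ↔ (1 ≤ p1 + s * d ∧ p1 + s * d ≤ n) := by
  rcases lt_trichotomy d 0 with hd | hd | hd
  · have hpos : 0 < -d := by omega
    have H := PySem.Int.le_floordiv_iff_mul_le (q := s) (a := p1 - 1) (b := -d) hpos
    have hneg : s * -d = -(s * d) := by ring
    have hnonpos : s * d ≤ 0 := mul_nonpos_of_nonneg_of_nonpos hs (by omega)
    simp only [axisLims, if_neg (by omega : ¬ d > 0), if_pos hd, List.mem_singleton,
      forall_eq]
    omega
  · subst hd
    simp only [axisLims, if_neg (by omega : ¬ (0:Int) > 0), if_neg (by omega : ¬ (0:Int) < 0)]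
    simp
    omega
  · have H := PySem.Int.le_floordiv_iff_mul_le (q := s) (a := n - p1) (b := d) hd
    have hnonneg : 0 ≤ s * d := mul_nonneg hs (by omega)
    simp only [axisLims, if_pos hd, List.mem_singleton, forall_eq]
    omega

lemma axis_elem_le (n d p1 : Int) (h1 : 1 ≤ p1) (h2 : p1 ≤ n) :
    ∀ x ∈ axisLims n d p1, x ≤ n := by
  intro x hx
  rcases lt_trichotomy d 0 with hd | hd | hd
  · have hpos : 0 < -d := by omega
    simp only [axisLims, if_neg (by omega : ¬ d > 0), if_pos hd, List.mem_singleton] at hx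
    subst hx
    have hdle : PySem.Int.floordiv (p1 - 1) (-d) ≤ p1 - 1 := by
      by_contra h
      have := (PySem.Int.le_floordiv_iff_mul_le (q := p1 - 1 + 1) (a := p1 - 1) (b := -d) hpos).mp (by omega)
      have h1d : (p1 - 1 + 1) * 1 ≤ (p1 - 1 + 1) * -d :=
        mul_le_mul_of_nonneg_left (by omega) (by omega)
      omega
    omega
  · subst hd; simp [axisLims] at hx
  · simp only [axisLims, if_pos hd, List.mem_singleton] at hx
    subst hx
    have hdle : PySem.Int.floordiv (n - p1) d ≤ n - p1 := by
      by_contra h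
      have := (PySem.Int.le_floordiv_iff_mul_le (q := n - p1 + 1) (a := n - p1) (b := d) hd).mp (by omega)
      have h1d : (n - p1 + 1) * 1 ≤ (n - p1 + 1) * d :=
        mul_le_mul_of_nonneg_left (by omega) (by omega)
      omega
    omega

lemma pos_shift (x d : Int) (t : Nat) (ht : 1 ≤ t) :
    posA x d t = (x + d) + ((t : Int) - 1) * d := by
  simp [posA]
  have : (1:Int) ≤ (t:Int) := by exact_mod_cast ht
  ring

lemma key_shift (n ur uc r c : Int) (t : Nat) (ht : 1 ≤ t) :
    (posA r ur t - 1) * n + posA c uc t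
      = ((r + ur - 1) * n + (c + uc)) + ((t : Int) - 1) * (ur * n + uc) := by
  rw [pos_shift r ur t ht, pos_shift c uc t ht]
  ring

lemma not_blk_of_inb (n ur uc r c : Int) (obs : List Int) (t : Nat)
    (hb : 1 ≤ posA r ur t ∧ posA r ur t ≤ n ∧ 1 ≤ posA c uc t ∧ posA c uc t ≤ n)
    (hk : ((posA r ur t - 1) * n + posA c uc t) ∉ obs) :
    ¬ blkP n ur uc r c obs t := by
  unfold blkP
  push_neg
  exact ⟨by omega, by omega, by omega, by omega, hk⟩

lemma moveQ_eq_alt_inb (n ur uc r c : Int) (obs : List Int)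
    (hin : 1 ≤ r + ur ∧ r + ur ≤ n ∧ 1 ≤ c + uc ∧ c + uc ≤ n)
    (hdir : ur ≠ 0 ∨ uc ≠ 0) :
    moveQ n ur uc r c obs = moveQ_alt n ur uc r c obs := by
  obtain ⟨hr1, hr2, hc1, hc2⟩ := hin
  set r1 := r + ur with hr1def
  set c1 := c + uc with hc1def
  set lims := axisLims n ur r1 ++ axisLims n uc c1 with hlims
  set d := ur * n + uc with hd
  set key1 := (r1 - 1) * n + c1 with hkey1
  -- the minimum exists
  have hne : lims ≠ [] := by
    rw [hlims]
    rcases hdir with h | h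
    · have hA : axisLims n ur r1 ≠ [] := by
        unfold axisLims
        rcases lt_trichotomy ur 0 with h' | h' | h'
        · rw [if_neg (by omega), if_pos h']; simp
        · exact absurd h' h
        · rw [if_pos h']; simp
      intro hcon
      exact hA (List.append_eq_nil_iff.mp hcon).1
    · have hA : axisLims n uc c1 ≠ [] := by
        unfold axisLims
        rcases lt_trichotomy uc 0 with h' | h' | h'
        · rw [if_neg (by omega), if_pos h']; simp
        · exact absurd h' h
        · rw [if_pos h']; simp
      intro hcon
      exact hA (List.append_eq_nil_iff.mp hcon).2
  obtain ⟨T, hT⟩ : ∃ T, PySem.List.min? lims (fun x => x) = some T := by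
    cases h : PySem.List.min? lims (fun x => x) with
    | none => exact absurd ((PySem.List.min?_eq_none_iff _ _).mp h) hne
    | some T => exact ⟨T, rfl⟩
  have hTmem : T ∈ lims := PySem.List.min?_mem hT
  have hTle : ∀ x ∈ lims, T ≤ x := by
    intro x hx
    simpa using PySem.List.min?_isMin hT x hx
  -- bounds on elements of lims
  have helem1 : ∀ x ∈ lims, 1 ≤ x := by
    intro x hx
    rcases List.mem_append.mp hx with h | h
    · exact ((axis_le_iff n ur r1 hr1 hr2 0 le_rfl).mpr (by constructor <;> omega)) x h
    · exact ((axis_le_iff n uc c1 hc1 hc2 0 le_rfl).mpr (by constructor <;> omega)) x h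
  have helemn : ∀ x ∈ lims, x ≤ n := by
    intro x hx
    rcases List.mem_append.mp hx with h | h
    · exact axis_elem_le n ur r1 hr1 hr2 x h
    · exact axis_elem_le n uc c1 hc1 hc2 x h
  have hT1 : 1 ≤ T := helem1 T hTmem
  have hTn : T ≤ n := helemn T hTmem
  -- in-bounds characterisation: for 1 ≤ t, step t is on the board iff t ≤ T
  have hinb : ∀ t : Nat, 1 ≤ t →
      (((t : Int) ≤ T) ↔ (1 ≤ posA r ur t ∧ posA r ur t ≤ n ∧ 1 ≤ posA c uc t ∧ posA c uc t ≤ n)) := by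
    intro t ht
    have hcast : (1:Int) ≤ (t:Int) := by exact_mod_cast ht
    have hR := axis_le_iff n ur r1 hr1 hr2 ((t:Int) - 1) (by omega)
    have hC := axis_le_iff n uc c1 hc1 hc2 ((t:Int) - 1) (by omega)
    rw [pos_shift r ur t ht, pos_shift c uc t ht]
    rw [← hr1def, ← hc1def]
    constructor
    · intro h
      have hall : ∀ x ∈ lims, (t:Int) ≤ x := fun x hx => le_trans h (hTle x hx)
      have hallR : ∀ x ∈ axisLims n ur r1, ((t:Int) - 1) + 1 ≤ x := by
        intro x hx; have := hall x (List.mem_append.mpr (Or.inl hx)); omega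
      have hallC : ∀ x ∈ axisLims n uc c1, ((t:Int) - 1) + 1 ≤ x := by
        intro x hx; have := hall x (List.mem_append.mpr (Or.inr hx)); omega
      obtain ⟨a1, a2⟩ := hR.mp hallR
      obtain ⟨b1, b2⟩ := hC.mp hallC
      exact ⟨a1, a2, b1, b2⟩
    · intro ⟨a1, a2, b1, b2⟩
      have hallR := hR.mpr ⟨a1, a2⟩
      have hallC := hC.mpr ⟨b1, b2⟩
      have : (t:Int) ≤ T := by
        rcases List.mem_append.mp hTmem with h | h
        · have := hallR T h; omega
        · have := hallC T h; omega
      exact this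
  -- the fold result
  set M := obs.foldl (foldStep key1 d) T with hM
  obtain ⟨hMcases, hMleT, hMmin⟩ := fold_min key1 d obs T
  rw [← hM] at hMcases hMleT hMmin
  have hM0 : 0 ≤ M := by
    rcases hMcases with h | ⟨o, ho, h⟩
    · omega
    · exact (stepsTo_sound o key1 d M h).1
  have hMn : M ≤ n := le_trans hMleT hTn
  -- B's result
  have halt : moveQ_alt n ur uc r c obs = M := by
    unfold moveQ_alt
    rw [if_pos ⟨hr1, hr2, hc1, hc2⟩]
    simp only [← hr1def, ← hc1def, ← hlims, ← hd, ← hkey1, hT, Option.getD_some, ← hM]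
  -- A's loop stops exactly after M steps
  set N := M.toNat with hN
  have hNM : (N : Int) = M := Int.toNat_of_nonneg hM0
  have hfree : ∀ t : Nat, 1 ≤ t → t ≤ N → ¬ blkP n ur uc r c obs t := by
    intro t ht htN
    have htM : (t : Int) ≤ M := by
      have : (t : Int) ≤ (N : Int) := by exact_mod_cast htN
      omega
    apply not_blk_of_inb
    · exact (hinb t ht).mp (by omega)
    · intro hk
      have hcast : (1:Int) ≤ (t:Int) := by exact_mod_cast ht
      have hkey : ((posA r ur t - 1) * n + posA c uc t) = key1 + ((t:Int) - 1) * d := by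
        rw [key_shift n ur uc r c t ht]
      obtain ⟨s', hs', hs'le⟩ :=
        stepsTo_complete ((posA r ur t - 1) * n + posA c uc t) key1 d ((t:Int) - 1)
          (by omega) (by rw [hkey])
      have := hMmin _ hk s' hs'
      omega
  have hblk : blkP n ur uc r c obs (N + 1) := by
    by_cases hMT : M = T
    · have hout : ¬ ((N:Int) + 1 ≤ T) := by omega
      have h := (hinb (N+1) (by omega))
      unfold blkP
      by_contra hcon
      push_neg at hcon
      have hb := h.mpr ⟨by push_cast; omega, by push_cast at hcon ⊢; omega,
        by push_cast at hcon ⊢; omega, by push_cast at hcon ⊢; omega⟩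
      push_cast at hb
      omega
    · have hMltT : M < T := lt_of_le_of_ne hMleT hMT
      rcases hMcases with h | ⟨o, ho, h⟩
      · omega
      · obtain ⟨_, hoeq⟩ := stepsTo_sound o key1 d M h
        unfold blkP
        have hkey : ((posA r ur (N+1) - 1) * n + posA c uc (N+1)) = key1 + (((N+1:Nat):Int) - 1) * d := by
          rw [key_shift n ur uc r c (N+1) (by omega)]
        have : ((posA r ur (N+1) - 1) * n + posA c uc (N+1)) = o := by
          rw [hkey, hoeq]; push_cast; rw [hNM]; ring_nf
        exact Or.inr (Or.inr (Or.inr (Or.inr (this ▸ ho))))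
  -- run the loop
  have hfuel : N + 1 ≤ 0 + (n.toNat + 2) := by
    have : M.toNat ≤ n.toNat := Int.toNat_le_toNat hMn
    omega
  have hloop := loop_eq n ur uc r c obs N hblk hfree (n.toNat + 2) 0 0 hfuel (by omega)
  unfold moveQ
  have h0r : posA r ur 0 = r := by simp [posA]
  have h0c : posA c uc 0 = c := by simp [posA]
  rw [h0r, h0c] at hloop
  rw [hloop, halt]
  omega

lemma blkP_first_out (n ur uc r c : Int) (obs : List Int)
    (hout : ¬ (1 ≤ r + ur ∧ r + ur ≤ n ∧ 1 ≤ c + uc ∧ c + uc ≤ n)) :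
    moveQ n ur uc r c obs = 0 := by
  unfold moveQ
  show moveQLoop n ur uc obs (n.toNat + 1 + 1) r c 0 = 0
  simp only [moveQLoop]
  rw [if_pos]
  rcases (by omega : (c + uc < 1) ∨ (r + ur < 1) ∨ (c + uc > n) ∨ (r + ur > n)) with h | h | h | h
  · exact Or.inl (by omega)
  · exact Or.inr (Or.inl (by omega))
  · exact Or.inr (Or.inr (Or.inl (by omega)))
  · exact Or.inr (Or.inr (Or.inr (Or.inl (by omega))))

-- ===== VERDICT (by name: the statement is the Claim_ definition above) =====
theorem moveQ_spec : Claim_equal_moveQ := by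
  unfold Claim_equal_moveQ
  intro n ur uc r c obs _ hPre
  unfold Spec_moveQ
  by_cases hin : 1 ≤ r + ur ∧ r + ur ≤ n ∧ 1 ≤ c + uc ∧ c + uc ≤ n
  · have hdir : ur ≠ 0 ∨ uc ≠ 0 := by
      unfold Pre_moveQ at hPre
      rcases hPre with h | h | h | h | h | h
      · exact Or.inl h
      · exact Or.inr h
      all_goals (exfalso; omega)
    exact moveQ_eq_alt_inb n ur uc r c obs hin hdir
  · rw [blkP_first_out n ur uc r c obs hin]
    unfold moveQ_alt
    rw [if_neg hin]
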